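-- pv_equiv track=rewrite | github.com/BullseyeLimited/Workers | workers/lib/content_pack.py | _count_by_media_and_explicitness
-- ===== SOURCE A (Python) =====
-- from typing import Any, Dict, Iterable, List, Optional
--
-- MEDIA_TYPE_ALIASES = {
--     "image": "photo",
--     "img": "photo",
--     "photo": "photo",
--     "photos": "photo",
--     "picture": "photo",
--     "pictures": "photo",
--     "pic": "photo",
--     "pics": "photo",
--     "video": "video",
--     "videos": "video",
--     "audio": "voice",
--     "voice": "voice",
--     "voice_note": "voice",
--     "voice_notes": "voice",
--     "voicenote": "voice",
--     "voicenotes": "voice",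
--     "sound": "voice",
--     "sounds": "voice",
--     "text": "text",
-- }
--
-- def _normalize_media_type(value: Optional[str]) -> Optional[str]:
--     if not value:
--         return None
--     key = str(value).strip().lower()
--     return MEDIA_TYPE_ALIASES.get(key, key)
--
-- def _count_by_media_and_explicitness(rows: List[Dict[str, Any]]) -> Dict[str, Dict[str, int]]:
--     counts: Dict[str, Dict[str, int]] = {}
--     for row in rows:
--         media_type = _normalize_media_type(row.get("media_type")) or "unknown"
--         explicitness = (row.get("explicitness") or "unknown").strip() or "unknown"
--         bucket = counts.setdefault(media_type, {})
--         bucket[explicitness] = bucket.get(explicitness, 0) + 1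
--         bucket["total"] = bucket.get("total", 0) + 1
--     return counts
-- ===== SOURCE B (Python) =====
-- from typing import Any, Dict, List, Optional
--
-- _CANONICAL_MEDIA = {
--     "photo": ("image", "img", "photo", "photos", "picture", "pictures", "pic", "pics"),
--     "video": ("video", "videos"),
--     "voice": ("audio", "voice", "voice_note", "voice_notes", "voicenote", "voicenotes",
--               "sound", "sounds"),
--     "text": ("text",),
-- }
-- _ALIAS_TO_CANONICAL = {alias: canon
--                        for canon, aliases in _CANONICAL_MEDIA.items()
--                        for alias in aliases}
--
--
-- def _count_by_media_and_explicitness(rows: List[Dict[str, Any]]) -> Dict[str, Dict[str, int]]: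
--     # Phase 1: one flat tally keyed by (media, explicitness); every row also bumps
--     # the (media, "total") cell, so totals are ordinary cells of the same table.
--     tally: Dict[tuple, int] = {}
--     for row in rows:
--         key = (row.get("media_type") or "").strip().lower()
--         media = _ALIAS_TO_CANONICAL.get(key, key) or "unknown"
--         explicitness = (row.get("explicitness") or "").strip() or "unknown"
--         for cell in ((media, explicitness), (media, "total")):
--             tally[cell] = tally.get(cell, 0) + 1
--     # Phase 2: reshape the flat tally into media -> {explicitness: count}.
--     result: Dict[str, Dict[str, int]] = {}
--     for (media, explicitness), n in tally.items():
--         result.setdefault(media, {})[explicitness] = n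
--     return result
-- ===== Notes on version B (the rewrite author's own statement) =====
-- stated objective: alternative
-- what changed: B replaces A's per-row mutation of a nested dict (setdefault bucket, then two in-bucket counter bumps) by a flat single-level tally keyed by (media, explicitness) pairs in which each row also bumps a (media, 'total') cell, followed by a separate reshape pass that groups the flat cells into media -> {explicitness: count}; the alias table is also stored canonically (canonical -> aliases) and inverted once.
import Mathlib
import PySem

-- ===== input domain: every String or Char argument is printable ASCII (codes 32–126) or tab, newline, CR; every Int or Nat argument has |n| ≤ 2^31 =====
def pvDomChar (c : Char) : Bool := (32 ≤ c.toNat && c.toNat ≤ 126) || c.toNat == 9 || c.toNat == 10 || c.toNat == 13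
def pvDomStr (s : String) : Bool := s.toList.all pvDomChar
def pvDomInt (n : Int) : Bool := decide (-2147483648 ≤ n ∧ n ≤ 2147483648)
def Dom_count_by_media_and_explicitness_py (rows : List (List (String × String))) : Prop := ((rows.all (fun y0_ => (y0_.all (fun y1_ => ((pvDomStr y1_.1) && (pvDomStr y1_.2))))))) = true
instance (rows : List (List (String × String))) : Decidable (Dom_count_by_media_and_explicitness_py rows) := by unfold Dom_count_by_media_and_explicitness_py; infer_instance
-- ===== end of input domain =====

-- B replaces A's nested-dict mutation by a flat (media, explicitness)-pair tally (totals are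
-- ordinary cells of the same table) followed by a reshape pass; objective: alternative decomposition.

-- ===== PORT A =====
def pvAliases : PySem.Dict String String := PySem.Dict.ofList [
  ("image", "photo"), ("img", "photo"), ("photo", "photo"), ("photos", "photo"),
  ("picture", "photo"), ("pictures", "photo"), ("pic", "photo"), ("pics", "photo"),
  ("video", "video"), ("videos", "video"),
  ("audio", "voice"), ("voice", "voice"), ("voice_note", "voice"), ("voice_notes", "voice"),
  ("voicenote", "voice"), ("voicenotes", "voice"), ("sound", "voice"), ("sounds", "voice"),
  ("text", "text")]

-- row.get(k) on a Python dict row: first match in the association list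
def pvRowGet (row : List (String × String)) (k : String) : Option String :=
  (row.find? (fun p => p.1 == k)).map (·.2)

-- _normalize_media_type
def pvNormalizeMedia (value : Option String) : Option String :=
  match value with
  | none => none
  | some s =>
    if s = "" then none
    else
      let key := PySem.Str.lower (PySem.Str.strip s)
      some ((pvAliases.get? key).getD key)

-- _normalize_media_type(row.get("media_type")) or "unknown"
def pvMediaOf (row : List (String × String)) : String :=
  match pvNormalizeMedia (pvRowGet row "media_type") with
  | none => "unknown"
  | some s => if s = "" then "unknown" else s

-- (row.get("explicitness") or "unknown").strip() or "unknown"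
def pvExplOf (row : List (String × String)) : String :=
  let e :=
    match pvRowGet row "explicitness" with
    | none => "unknown"
    | some s => if s = "" then "unknown" else s
  let e2 := PySem.Str.strip e
  if e2 = "" then "unknown" else e2

def count_by_media_and_explicitness_py (rows : List (List (String × String))) : List (String × List (String × Int)) :=
  let counts : PySem.Dict String (PySem.Dict String Int) :=
    rows.foldl (fun counts row =>
      let media_type := pvMediaOf row
      let explicitness := pvExplOf row
      -- bucket = counts.setdefault(media_type, {}); mutations land back via insert (keeps position)
      let bucket := counts.getD media_type PySem.Dict.empty
      let bucket := bucket.insert explicitness (bucket.getD explicitness 0 + 1)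
      let bucket := bucket.insert "total" (bucket.getD "total" 0 + 1)
      counts.insert media_type bucket) PySem.Dict.empty
  counts.items.map (fun q => (q.1, q.2.items))

-- ===== PORT B =====
-- _CANONICAL_MEDIA: canonical type -> its aliases
def pvCanonicalMedia : List (String × List String) := [
  ("photo", ["image", "img", "photo", "photos", "picture", "pictures", "pic", "pics"]),
  ("video", ["video", "videos"]),
  ("voice", ["audio", "voice", "voice_note", "voice_notes", "voicenote", "voicenotes",
             "sound", "sounds"]),
  ("text", ["text"])]

-- _ALIAS_TO_CANONICAL = {alias: canon for canon, aliases in _CANONICAL_MEDIA.items() for alias in aliases}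
def pvAliasToCanonical : PySem.Dict String String :=
  PySem.Dict.ofList (pvCanonicalMedia.flatMap (fun c => c.2.map (fun a => (a, c.1))))

-- row.get(k) via the dict view of the row
def pvRowLookup (row : List (String × String)) (k : String) : Option String :=
  (PySem.Dict.mk row).get? k

-- key = (row.get("media_type") or "").strip().lower(); _ALIAS_TO_CANONICAL.get(key, key) or "unknown"
def pvMediaB (row : List (String × String)) : String :=
  let key := PySem.Str.lower (PySem.Str.strip ((pvRowLookup row "media_type").getD ""))
  let media := (pvAliasToCanonical.get? key).getD key
  if media = "" then "unknown" else media

-- (row.get("explicitness") or "").strip() or "unknown"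
def pvExplB (row : List (String × String)) : String :=
  let e := PySem.Str.strip ((pvRowLookup row "explicitness").getD "")
  if e = "" then "unknown" else e

def count_by_media_and_explicitness_py_alt (rows : List (List (String × String))) : List (String × List (String × Int)) :=
  -- Phase 1: flat tally over (media, explicitness) cells, plus a (media, "total") cell per row
  let tally : PySem.Dict (String × String) Int :=
    rows.foldl (fun t row =>
      let media := pvMediaB row
      let explicitness := pvExplB row
      [(media, explicitness), (media, "total")].foldl
        (fun t cell => t.insert cell (t.getD cell 0 + 1)) t)
      PySem.Dict.empty
  -- Phase 2: reshape into media -> {explicitness: count}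
  let result : PySem.Dict String (PySem.Dict String Int) :=
    tally.items.foldl (fun r q =>
      r.insert q.1.1 ((r.getD q.1.1 PySem.Dict.empty).insert q.1.2 q.2))
      PySem.Dict.empty
  result.items.map (fun q => (q.1, q.2.items))

-- ===== PRECONDITION & SPEC =====
def Spec_count_by_media_and_explicitness_py (rows : List (List (String × String))) (out : List (String × List (String × Int))) : Prop := out = count_by_media_and_explicitness_py_alt rows
instance (rows : List (List (String × String))) (out : List (String × List (String × Int))) : Decidable (Spec_count_by_media_and_explicitness_py rows out) := by unfold Spec_count_by_media_and_explicitness_py; infer_instance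

-- ===== CLAIM (what is proved, stated in full; the proofs are below) =====
def Claim_equal_count_by_media_and_explicitness_py : Prop := ∀ (rows : List (List (String × String))), Dom_count_by_media_and_explicitness_py rows → Spec_count_by_media_and_explicitness_py rows (count_by_media_and_explicitness_py rows)


-- ===== LEMMAS AND PROOFS =====

-- canonical description of a media bucket: distinct explicitness values in first-seen order,
-- with the derived "total" key sitting right after the first one (merged if the first IS "total")
def pvOrder (es : List String) : List String :=
  match PySem.List.dedup es with
  | [] => []
  | e1 :: rest =>
    if e1 = "total" then e1 :: rest
    else e1 :: "total" :: rest.filter (fun e => !(e == "total"))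

def pvVal (es : List String) (e : String) : Int :=
  if e = "total" then (es.length : Int) + (es.count "total" : Nat) else (es.count e : Nat)

def pvBucket (es : List String) : List (String × Int) :=
  (pvOrder es).map (fun e => (e, pvVal es e))

def pvEsOf (m : String) (ps : List (String × String)) : List String :=
  (ps.filter (fun p => p.1 == m)).map Prod.snd

theorem pv_dedup_ne_nil {es : List String} (h : es ≠ []) : PySem.List.dedup es ≠ [] := by
  cases es with
  | nil => exact absurd rfl h
  | cons a t =>
    intro hd
    have : a ∈ PySem.List.dedup (a :: t) := (PySem.List.mem_dedup _ _).2 (List.mem_cons_self)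
    rw [hd] at this; exact absurd this (List.not_mem_nil)

theorem pv_order_nodup (es : List String) : (pvOrder es).Nodup := by
  unfold pvOrder
  have hnd := PySem.List.nodup_dedup es
  cases h : PySem.List.dedup es with
  | nil => simp
  | cons e1 rest =>
    rw [h] at hnd
    have h1 : e1 ∉ rest := (List.nodup_cons.1 hnd).1
    have h2 : rest.Nodup := (List.nodup_cons.1 hnd).2
    by_cases ht : e1 = "total"
    · simp only [if_pos ht]; exact hnd
    · simp only [if_neg ht]
      refine List.nodup_cons.2 ⟨?_, List.nodup_cons.2 ⟨?_, h2.filter _⟩⟩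
      · simp only [List.mem_cons, List.mem_filter]
        rintro (h3 | ⟨h3, _⟩) <;> [exact ht h3; exact h1 h3]
      · simp

theorem pv_mem_order {es : List String} {x : String} (h : es ≠ []) :
    x ∈ pvOrder es ↔ x ∈ es ∨ x = "total" := by
  unfold pvOrder
  cases hd : PySem.List.dedup es with
  | nil => exact absurd hd (pv_dedup_ne_nil h)
  | cons e1 rest =>
    have hx : ∀ y : String, (y ∈ es) = (y = e1 ∨ y ∈ rest) := by
      intro y
      rw [← PySem.List.mem_dedup es y, hd]; simp
    by_cases ht : e1 = "total"
    · subst ht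
      simp only [if_true, List.mem_cons, hx]
      tauto
    · simp only [if_neg ht, List.mem_cons, List.mem_filter, hx]
      by_cases hxt : x = "total" <;> simp [hxt] <;> tauto

theorem pv_total_mem_order {es : List String} (h : es ≠ []) : "total" ∈ pvOrder es :=
  (pv_mem_order h).2 (Or.inr rfl)

theorem pv_dedup_append {α : Type} [BEq α] [LawfulBEq α] {xs : List α} {x : α} :
    PySem.List.dedup (xs ++ [x]) =
      if x ∈ xs then PySem.List.dedup xs else PySem.List.dedup xs ++ [x] := by
  have h : PySem.List.dedup (xs ++ [x]) = (PySem.Set.ofList xs).add x := by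
    simp [PySem.List.dedup_eq_ofList, PySem.Set.ofList, List.foldl_append]
  rw [h, PySem.Set.add]
  by_cases hx : x ∈ xs
  · rw [if_pos hx, if_pos (by rw [PySem.Set.contains_iff, ← PySem.List.dedup_eq_ofList, PySem.List.mem_dedup]; exact hx)]
    simp [PySem.List.dedup_eq_ofList]
  · rw [if_neg hx, if_neg (by rw [PySem.Set.contains_iff, ← PySem.List.dedup_eq_ofList, PySem.List.mem_dedup]; simpa using hx)]
    simp [PySem.List.dedup_eq_ofList]

theorem pv_order_append_mem {es : List String} {e : String} (hne : es ≠ [])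
    (h : e ∈ es ∨ e = "total") : pvOrder (es ++ [e]) = pvOrder es := by
  by_cases hm : e ∈ es
  · unfold pvOrder
    rw [pv_dedup_append, if_pos hm]
  · have ht : e = "total" := h.resolve_left hm
    subst ht
    unfold pvOrder
    rw [pv_dedup_append, if_neg hm]
    cases hd : PySem.List.dedup es with
    | nil => exact absurd hd (pv_dedup_ne_nil hne)
    | cons e1 rest =>
      have he1 : e1 ≠ "total" := by
        intro hh
        exact hm (by rw [← PySem.List.mem_dedup es, hd, hh]; exact List.mem_cons_self)
      simp [he1, List.filter_append]

theorem pv_order_append_not_mem {es : List String} {e : String} (hne : es ≠ [])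
    (h1 : e ∉ es) (h2 : e ≠ "total") : pvOrder (es ++ [e]) = pvOrder es ++ [e] := by
  unfold pvOrder
  rw [pv_dedup_append, if_neg h1]
  cases hd : PySem.List.dedup es with
  | nil => exact absurd hd (pv_dedup_ne_nil hne)
  | cons e1 rest =>
    by_cases he1 : e1 = "total"
    · simp [he1]
    · simp [he1, List.filter_append, h2]

theorem pv_keys_mkBucket (es : List String) :
    (PySem.Dict.mk (pvBucket es)).keys = pvOrder es := by
  rw [pvBucket, PySem.Dict.keys_mk, List.map_map]
  exact List.map_id _

theorem pv_contains_mkBucket (es : List String) (x : String) :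
    (PySem.Dict.mk (pvBucket es)).contains x = decide (x ∈ pvOrder es) := by
  rw [PySem.Dict.contains_eq_decide_mem_keys, pv_keys_mkBucket]

theorem pv_getD_mkBucket {es : List String} (hne : es ≠ []) (x : String) :
    (PySem.Dict.mk (pvBucket es)).getD x 0 = pvVal es x := by
  by_cases hx : x ∈ pvOrder es
  · exact PySem.Dict.getD_of_mem_items _
      (by rw [pvBucket]; exact List.mem_map.2 ⟨x, hx, rfl⟩)
      (by rw [pv_keys_mkBucket]; exact pv_order_nodup es) 0
  · rw [PySem.Dict.getD_of_not_contains _ 0 (by rw [pv_contains_mkBucket]; simpa using hx)]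
    rw [pv_mem_order hne] at hx
    rw [not_or] at hx
    rw [pvVal, if_neg hx.2, List.count_eq_zero.2 (by simpa using hx.1)]
    rfl

-- A's per-row step, over the precomputed (media, explicitness) pair
def pvStepA (counts : PySem.Dict String (PySem.Dict String Int)) (p : String × String) :
    PySem.Dict String (PySem.Dict String Int) :=
  let bucket := counts.getD p.1 PySem.Dict.empty
  let bucket := bucket.insert p.2 (bucket.getD p.2 0 + 1)
  let bucket := bucket.insert "total" (bucket.getD "total" 0 + 1)
  counts.insert p.1 bucket

theorem pv_bucket_step {es : List String} (hne : es ≠ []) (e : String) :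
    (let b := PySem.Dict.mk (pvBucket es)
     let b1 := b.insert e (b.getD e 0 + 1)
     b1.insert "total" (b1.getD "total" 0 + 1)) = PySem.Dict.mk (pvBucket (es ++ [e])) := by
  simp only []
  set b := PySem.Dict.mk (pvBucket es) with hb
  have hct : b.contains "total" = true := by
    rw [pv_contains_mkBucket]; simpa using pv_total_mem_order hne
  have hgd : ∀ x, b.getD x 0 = pvVal es x := pv_getD_mkBucket hne
  by_cases he : e ∈ pvOrder es
  · have hce : b.contains e = true := by rw [pv_contains_mkBucket]; simpa using he
    have h1 : (b.insert e (b.getD e 0 + 1)).items =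
        (pvBucket es).map (fun p => if p.1 == e then (e, pvVal es e + 1) else p) := by
      rw [PySem.Dict.items_insert_of_contains _ _ hce, hgd]
    have hc1 : (b.insert e (b.getD e 0 + 1)).contains "total" = true := by
      rw [PySem.Dict.contains_insert, hct, Bool.or_true]
    have hg1 : (b.insert e (b.getD e 0 + 1)).getD "total" 0 =
        if "total" = e then pvVal es e + 1 else pvVal es "total" := by
      rw [PySem.Dict.getD_insert, hgd, hgd]
    apply PySem.Dict.ext
    rw [PySem.Dict.items_insert_of_contains _ _ hc1, h1, hg1]
    rw [pvBucket, pvBucket, pv_order_append_mem hne ((pv_mem_order hne).1 he), List.map_map, List.map_map]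
    apply List.map_congr_left
    intro y hy
    simp only [Function.comp]
    by_cases hye : y = e
    · subst hye
      by_cases hyt : y = "total"
      · subst hyt
        simp [pvVal, List.count_append]
        push_cast; ring
      · simp [hyt, pvVal, List.count_append]
    · by_cases hyt : y = "total"
      · subst hyt
        simp [hye, Ne.symm hye, pvVal, List.count_append, List.count_singleton]
        all_goals (push_cast; ring)
      · simp [hye, Ne.symm hye, hyt, pvVal, List.count_append, List.count_singleton]
        all_goals (push_cast; ring)
  · have hnes : e ∉ es ∧ e ≠ "total" := by
      rw [pv_mem_order hne] at he
      exact ⟨fun h => he (Or.inl h), fun h => he (Or.inr h)⟩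
    have hce : b.contains e = false := by
      rw [pv_contains_mkBucket]; simpa using he
    have h1 : (b.insert e (b.getD e 0 + 1)).items = pvBucket es ++ [(e, pvVal es e + 1)] := by
      rw [PySem.Dict.items_insert_of_not_contains _ _ hce, hgd]
    have hc1 : (b.insert e (b.getD e 0 + 1)).contains "total" = true := by
      rw [PySem.Dict.contains_insert, hct, Bool.or_true]
    have hg1 : (b.insert e (b.getD e 0 + 1)).getD "total" 0 = pvVal es "total" := by
      rw [PySem.Dict.getD_insert, if_neg (Ne.symm hnes.2), hgd]
    apply PySem.Dict.ext
    rw [PySem.Dict.items_insert_of_contains _ _ hc1, h1, hg1, List.map_append]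
    rw [pvBucket, pvBucket, pv_order_append_not_mem hne hnes.1 hnes.2, List.map_append, List.map_map]
    congr 1
    · apply List.map_congr_left
      intro y hy
      have hye : y ≠ e := fun h => he (h ▸ hy)
      simp only [Function.comp]
      by_cases hyt : y = "total"
      · subst hyt
        simp [hnes.2, pvVal, List.count_append]
        push_cast; ring
      · simp [hyt, Ne.symm hye, pvVal, List.count_append]
    · have hz : es.count e = 0 := List.count_eq_zero.2 (by simpa using hnes.1)
      simp [pvVal, List.count_append, hnes.2, hz, List.count_singleton]

theorem pv_bucket_base (e : String) :
    (let b : PySem.Dict String Int := PySem.Dict.empty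
     let b1 := b.insert e (b.getD e 0 + 1)
     b1.insert "total" (b1.getD "total" 0 + 1)) = PySem.Dict.mk (pvBucket [e]) := by
  by_cases he : e = "total"
  · subst he; decide
  · simp only []
    have hd1 : PySem.Set.ofList [e] = [e] := by
      simp [PySem.Set.ofList, PySem.Set.add, PySem.Set.empty, PySem.Set.contains]
    have h0 : ((PySem.Dict.empty : PySem.Dict String Int).insert e
        ((PySem.Dict.empty : PySem.Dict String Int).getD e 0 + 1)) = PySem.Dict.mk [(e, 1)] := by
      apply PySem.Dict.ext
      rw [PySem.Dict.items_insert_of_not_contains _ _ (by simp [PySem.Dict.contains_empty]),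
        PySem.Dict.getD_empty]
      simp [PySem.Dict.empty]
    rw [h0]
    have hct : (PySem.Dict.mk [(e, (1 : Int))]).contains "total" = false := by
      rw [PySem.Dict.contains_eq_decide_mem_keys, PySem.Dict.keys_mk]
      simp [Ne.symm he]
    apply PySem.Dict.ext
    rw [PySem.Dict.items_insert_of_not_contains _ _ hct,
      PySem.Dict.getD_of_not_contains _ _ hct]
    simp [pvBucket, pvOrder, PySem.List.dedup_eq_ofList, hd1, he, pvVal]

theorem pv_esOf_append (m' m e : String) (ps : List (String × String)) :
    pvEsOf m' (ps ++ [(m, e)]) = pvEsOf m' ps ++ (if m = m' then [e] else []) := by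
  by_cases h : m = m' <;> simp [pvEsOf, List.filter_append, h]

theorem pv_esOf_nil {m : String} {ps : List (String × String)} (h : m ∉ ps.map Prod.fst) :
    pvEsOf m ps = [] := by
  unfold pvEsOf
  rw [List.filter_eq_nil_iff.2 (fun p hp => by
    simp only [beq_iff_eq]
    intro hpm
    exact h (List.mem_map.2 ⟨p, hp, hpm⟩))]
  rfl

theorem pv_esOf_ne_nil {m : String} {ps : List (String × String)} (h : m ∈ ps.map Prod.fst) :
    pvEsOf m ps ≠ [] := by
  obtain ⟨p, hp, hpm⟩ := List.mem_map.1 h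
  intro hnil
  have h1 : p ∈ ps.filter (fun p => p.1 == m) := List.mem_filter.2 ⟨hp, by simp [hpm]⟩
  have h2 : p.2 ∈ pvEsOf m ps := List.mem_map.2 ⟨p, h1, rfl⟩
  rw [hnil] at h2
  exact absurd h2 (List.not_mem_nil)

theorem pv_agg_items (ps : List (String × String)) :
    (ps.foldl pvStepA PySem.Dict.empty).items =
      (PySem.List.dedup (ps.map Prod.fst)).map
        (fun m => (m, PySem.Dict.mk (pvBucket (pvEsOf m ps)))) := by
  induction ps using List.reverseRecOn with
  | nil => rfl
  | append_singleton ps p ih =>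
    obtain ⟨m, e⟩ := p
    rw [List.foldl_append, List.foldl_cons, List.foldl_nil]
    have hkeys : (ps.foldl pvStepA PySem.Dict.empty).keys = PySem.List.dedup (ps.map Prod.fst) := by
      simp only [PySem.Dict.keys, ih, List.map_map]
      exact List.map_id _
    have hnodup : (ps.foldl pvStepA PySem.Dict.empty).keys.Nodup := by
      rw [hkeys]; exact PySem.List.nodup_dedup _
    simp only [pvStepA]
    by_cases hm : m ∈ ps.map Prod.fst
    · have hc : (ps.foldl pvStepA PySem.Dict.empty).contains m = true := by
        rw [PySem.Dict.contains_eq_decide_mem_keys, hkeys]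
        simp [hm]
      have hgetD : (ps.foldl pvStepA PySem.Dict.empty).getD m PySem.Dict.empty =
          PySem.Dict.mk (pvBucket (pvEsOf m ps)) := by
        refine PySem.Dict.getD_of_mem_items _ ?_ hnodup _
        rw [ih]
        exact List.mem_map.2 ⟨m, (PySem.List.mem_dedup _ _).2 hm, rfl⟩
      rw [hgetD]
      rw [PySem.Dict.items_insert_of_contains _ _ hc, ih]
      rw [List.map_append]
      simp only [List.map_cons, List.map_nil]
      rw [pv_dedup_append, if_pos hm, List.map_map]
      apply List.map_congr_left
      intro m' hm'
      simp only [Function.comp]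
      by_cases hmm : m' = m
      · subst hmm
        simp only [beq_self_eq_true, if_pos]
        have := pv_bucket_step (pv_esOf_ne_nil hm) e
        simp only [] at this
        rw [this, pv_esOf_append, if_pos rfl]
      · have : (m' == m) = false := by simp [hmm]
        simp only [this, Bool.false_eq_true, if_false]
        rw [pv_esOf_append, if_neg (fun h => hmm h.symm), List.append_nil]
    · have hc : (ps.foldl pvStepA PySem.Dict.empty).contains m = false := by
        rw [PySem.Dict.contains_eq_decide_mem_keys, hkeys]
        simp [hm]
      have hgetD : (ps.foldl pvStepA PySem.Dict.empty).getD m PySem.Dict.empty =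
          PySem.Dict.empty := PySem.Dict.getD_of_not_contains _ _ hc
      rw [hgetD]
      rw [PySem.Dict.items_insert_of_not_contains _ _ hc, ih]
      rw [List.map_append]
      simp only [List.map_cons, List.map_nil]
      rw [pv_dedup_append, if_neg hm, List.map_append]
      congr 1
      · apply List.map_congr_left
        intro m' hm'
        have hmm : m' ≠ m := by
          intro h
          exact hm (h ▸ (PySem.List.mem_dedup _ _).1 hm')
        rw [pv_esOf_append, if_neg (fun h => hmm h.symm), List.append_nil]
      · simp only [List.map_cons, List.map_nil]
        have := pv_bucket_base e
        simp only [] at this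
        rw [this, pv_esOf_append, if_pos rfl, pv_esOf_nil hm]
        rfl

theorem pv_portA_eq (rows : List (List (String × String))) :
    count_by_media_and_explicitness_py rows =
      (((rows.map (fun row => (pvMediaOf row, pvExplOf row))).foldl pvStepA
        PySem.Dict.empty).items).map (fun q => (q.1, q.2.items)) := by
  unfold count_by_media_and_explicitness_py
  rw [List.foldl_map]
  rfl

-- ===== B-side lemmas =====

-- the flat cell stream: each pair followed by its (media, "total") companion
def pvDbl (p : String × String) : List (String × String) := [p, (p.1, "total")]
def pvQs (ps : List (String × String)) : List (String × String) := ps.flatMap pvDbl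
def pvQsE (es : List String) : List String := es.flatMap (fun e => [e, "total"])

theorem pv_rowLookup_eq (row : List (String × String)) (k : String) :
    pvRowLookup row k = pvRowGet row k := by
  unfold pvRowLookup pvRowGet
  induction row with
  | nil => rfl
  | cons p t ih =>
    obtain ⟨a, b⟩ := p
    rw [List.find?_cons]
    by_cases h : a = k
    · simp [PySem.Dict.get?_mk_cons, h]
    · have hb : (a == k) = false := by simp [h]
      rw [PySem.Dict.get?_mk_cons, hb]
      simp only [hb, Bool.false_eq_true, if_false]
      exact ih

theorem pv_alias_eq : pvAliasToCanonical = pvAliases := by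
  decide

theorem pv_mediaB_eq (row : List (String × String)) : pvMediaB row = pvMediaOf row := by
  unfold pvMediaB pvMediaOf pvNormalizeMedia
  rw [pv_rowLookup_eq, pv_alias_eq]
  cases h : pvRowGet row "media_type" with
  | none => simp only [Option.getD_none]; decide
  | some s =>
    by_cases hs : s = ""
    · subst hs; simp only [Option.getD_some, if_true]; decide
    · simp only [hs, if_false, Option.getD_some]

theorem pv_explB_eq (row : List (String × String)) : pvExplB row = pvExplOf row := by
  unfold pvExplB pvExplOf
  rw [pv_rowLookup_eq]
  cases h : pvRowGet row "explicitness" with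
  | none => simp only [Option.getD_none]; decide
  | some s =>
    by_cases hs : s = ""
    · subst hs; simp only [Option.getD_some, if_true]; decide
    · simp [hs]

theorem pv_foldl_flatMap {α β γ : Type} (f : α → List β) (step : γ → β → γ)
    (l : List α) (init : γ) :
    l.foldl (fun t p => (f p).foldl step t) init = (l.flatMap f).foldl step init := by
  induction l generalizing init with
  | nil => rfl
  | cons p t ih => simp only [List.flatMap_cons, List.foldl_append, List.foldl_cons, ih]

theorem pv_tally_eq (rows : List (List (String × String))) :
    rows.foldl (fun t row =>
      let media := pvMediaB row
      let explicitness := pvExplB row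
      [(media, explicitness), (media, "total")].foldl
        (fun t cell => t.insert cell (t.getD cell 0 + 1)) t) PySem.Dict.empty
    = PySem.Dict.counter (pvQs (rows.map (fun row => (pvMediaOf row, pvExplOf row)))) := by
  have h1 : (fun (t : PySem.Dict (String × String) Int) row =>
      let media := pvMediaB row
      let explicitness := pvExplB row
      [(media, explicitness), (media, "total")].foldl
        (fun t cell => t.insert cell (t.getD cell 0 + 1)) t) =
      (fun t row => (pvDbl ((fun r => (pvMediaOf r, pvExplOf r)) row)).foldl
        (fun t cell => t.insert cell (t.getD cell 0 + 1)) t) := by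
    funext t row
    simp only [pv_mediaB_eq, pv_explB_eq, pvDbl]
  rw [h1, pv_foldl_flatMap]
  have h2 : rows.flatMap (fun row => pvDbl ((fun r => (pvMediaOf r, pvExplOf r)) row)) =
      pvQs (rows.map (fun row => (pvMediaOf row, pvExplOf row))) := by
    simp [pvQs, List.flatMap_map]
  rw [h2]
  exact PySem.Dict.foldl_insert_getD_add_one_eq_counter _

theorem pv_dedup_singleton {α : Type} [BEq α] [LawfulBEq α] (x : α) :
    PySem.List.dedup [x] = [x] := by
  have h := pv_dedup_append (xs := ([] : List α)) (x := x)
  rw [List.nil_append, if_neg (List.not_mem_nil (a := x))] at h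
  rw [h]
  rfl

theorem pv_order_singleton (e : String) :
    pvOrder [e] = if e = "total" then [e] else [e, "total"] := by
  unfold pvOrder
  rw [pv_dedup_singleton]
  by_cases he : e = "total" <;> simp [he]

theorem pv_dedup_filter {α : Type} [BEq α] [LawfulBEq α] (p : α → Bool) (l : List α) :
    (PySem.List.dedup l).filter p = PySem.List.dedup (l.filter p) := by
  induction l using List.reverseRecOn with
  | nil => rfl
  | append_singleton l x ih =>
    rw [List.filter_append, List.filter_singleton, pv_dedup_append]
    by_cases hx : x ∈ l
    · rw [if_pos hx, ih]
      by_cases hp : p x = true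
      · have hxf : x ∈ l.filter p := List.mem_filter.2 ⟨hx, hp⟩
        rw [hp, cond_true, pv_dedup_append, if_pos hxf]
      · have hpf : p x = false := by simpa using hp
        rw [hpf, cond_false, List.append_nil]
    · rw [if_neg hx, List.filter_append, List.filter_singleton, ih]
      by_cases hp : p x = true
      · have hxf : x ∉ l.filter p := fun h => hx (List.mem_filter.1 h).1
        rw [hp, cond_true, pv_dedup_append, if_neg hxf]
      · have hpf : p x = false := by simpa using hp
        rw [hpf, cond_false, List.append_nil, List.append_nil]

theorem pv_dedup_map_inj {α β : Type} [BEq α] [LawfulBEq α] [BEq β] [LawfulBEq β]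
    (f : α → β) (hf : Function.Injective f) (l : List α) :
    PySem.List.dedup (l.map f) = (PySem.List.dedup l).map f := by
  induction l using List.reverseRecOn with
  | nil => rfl
  | append_singleton l x ih =>
    rw [List.map_append, List.map_singleton, pv_dedup_append, pv_dedup_append]
    by_cases hx : x ∈ l
    · rw [if_pos (List.mem_map_of_mem hx), if_pos hx, ih]
    · have hfx : f x ∉ l.map f := by
        intro h
        obtain ⟨y, hy, he⟩ := List.mem_map.1 h
        exact hx (hf he ▸ hy)
      rw [if_neg hfx, if_neg hx, ih, List.map_append, List.map_singleton]

theorem pv_dedup_map_dedup {α β : Type} [BEq α] [LawfulBEq α] [BEq β] [LawfulBEq β]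
    (f : α → β) (l : List α) :
    PySem.List.dedup ((PySem.List.dedup l).map f) = PySem.List.dedup (l.map f) := by
  induction l using List.reverseRecOn with
  | nil => rfl
  | append_singleton l x ih =>
    rw [List.map_append, List.map_singleton, pv_dedup_append (xs := l) (x := x)]
    by_cases hx : x ∈ l
    · rw [if_pos hx, ih, pv_dedup_append, if_pos (List.mem_map_of_mem hx)]
    · rw [if_neg hx, List.map_append, List.map_singleton, pv_dedup_append, pv_dedup_append]
      have hmm : (f x ∈ (PySem.List.dedup l).map f) ↔ (f x ∈ l.map f) := by
        simp only [List.mem_map, PySem.List.mem_dedup]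
      by_cases hfx : f x ∈ l.map f
      · rw [if_pos (hmm.2 hfx), if_pos hfx, ih]
      · rw [if_neg (fun h => hfx (hmm.1 h)), if_neg hfx, ih]

theorem pv_qs_append (ps : List (String × String)) (p : String × String) :
    pvQs (ps ++ [p]) = pvQs ps ++ [p, (p.1, "total")] := by
  simp [pvQs, pvDbl]

theorem pv_qs_fst_mem (ps : List (String × String)) (x : String) :
    x ∈ (pvQs ps).map Prod.fst ↔ x ∈ ps.map Prod.fst := by
  have h : (pvQs ps).map Prod.fst = ps.flatMap (fun p => [p.1, p.1]) := by
    induction ps with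
    | nil => rfl
    | cons p t ih =>
      simp only [pvQs] at ih
      simp [pvQs, pvDbl, List.flatMap_cons, ih]
  rw [h]
  simp only [List.mem_flatMap, List.mem_map, List.mem_cons, List.not_mem_nil, or_false]
  constructor
  · rintro ⟨p, hp, (rfl | rfl)⟩ <;> exact ⟨p, hp, rfl⟩
  · rintro ⟨p, hp, rfl⟩
    exact ⟨p, hp, Or.inl rfl⟩

theorem pv_dedup_qs_fst (ps : List (String × String)) :
    PySem.List.dedup ((pvQs ps).map Prod.fst) = PySem.List.dedup (ps.map Prod.fst) := by
  induction ps using List.reverseRecOn with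
  | nil => rfl
  | append_singleton ps p ih =>
    rw [pv_qs_append, List.map_append]
    have h1 : ([p, (p.1, "total")].map Prod.fst) = [p.1] ++ [p.1] := rfl
    rw [h1, ← List.append_assoc, pv_dedup_append, if_pos (by simp), pv_dedup_append, ih,
      List.map_append, List.map_singleton, pv_dedup_append]
    by_cases hm : p.1 ∈ ps.map Prod.fst
    · rw [if_pos ((pv_qs_fst_mem ps p.1).2 hm), if_pos hm]
    · rw [if_neg (fun h => hm ((pv_qs_fst_mem ps p.1).1 h)), if_neg hm]

theorem pv_qs_filter (m : String) (ps : List (String × String)) :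
    (pvQs ps).filter (fun k => k.1 == m) = (pvQsE (pvEsOf m ps)).map (fun e => (m, e)) := by
  induction ps with
  | nil => rfl
  | cons p t ih =>
    obtain ⟨a, b⟩ := p
    by_cases ha : a = m
    · subst ha
      simp [pvQs, pvDbl, pvQsE, pvEsOf, List.flatMap_cons, List.filter_append, ih]
      exact ih
    · have hb : (a == m) = false := by simp [ha]
      simp only [pvQs, pvDbl, List.flatMap_cons, List.filter_append, List.filter_cons,
        List.filter_nil, hb, Bool.false_eq_true, if_false, pvEsOf, List.nil_append]
      simpa [pvQs, pvEsOf] using ih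

theorem pv_mem_qsE (es : List String) (x : String) :
    x ∈ pvQsE es ↔ x ∈ es ∨ (es ≠ [] ∧ x = "total") := by
  induction es with
  | nil => simp [pvQsE]
  | cons a t ih =>
    have hc : pvQsE (a :: t) = a :: "total" :: pvQsE t := rfl
    rw [hc]
    simp only [List.mem_cons, ih, ne_eq, List.cons_ne_nil, not_false_iff, true_and]
    by_cases ht : t = [] <;> simp [ht] <;> tauto

theorem pv_dedup_qsE (es : List String) : PySem.List.dedup (pvQsE es) = pvOrder es := by
  induction es using List.reverseRecOn with
  | nil => rfl
  | append_singleton es e ih =>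
    have hq : pvQsE (es ++ [e]) = pvQsE es ++ [e] ++ ["total"] := by simp [pvQsE]
    by_cases hne : es = []
    · subst hne
      have h1 : pvQsE ([] ++ [e]) = [e] ++ ["total"] := rfl
      rw [h1, pv_dedup_append, pv_dedup_singleton, List.nil_append, pv_order_singleton]
      by_cases he : e = "total"
      · rw [if_pos (List.mem_singleton.2 he.symm), if_pos he]
      · rw [if_neg (fun h => he (List.mem_singleton.1 h).symm), if_neg he]
        rfl
    · rw [hq, pv_dedup_append, pv_dedup_append]
      have htot : "total" ∈ pvQsE es := (pv_mem_qsE es "total").2 (Or.inr ⟨hne, rfl⟩)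
      by_cases hm : e ∈ es ∨ e = "total"
      · have hmq : e ∈ pvQsE es := (pv_mem_qsE es e).2 (by tauto)
        rw [if_pos hmq, if_pos (by simp [htot]), ih, pv_order_append_mem hne hm]
      · push_neg at hm
        have hmq : e ∉ pvQsE es := by
          rw [pv_mem_qsE]
          rintro (h | ⟨_, h⟩)
          · exact hm.1 h
          · exact hm.2 h
        rw [if_neg hmq, if_pos (by simp [htot, Ne.symm hm.2]), ih,
          pv_order_append_not_mem hne hm.1 hm.2]

theorem pv_count_qs (ps : List (String × String)) (m e : String) :
    (pvQs ps).count (m, e) = (pvQsE (pvEsOf m ps)).count e := by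
  have h1 : ((pvQs ps).filter (fun k => k.1 == m)).count ((m, e) : String × String) =
      (pvQs ps).count (m, e) := List.count_filter (by simp)
  rw [← h1, pv_qs_filter]
  exact List.count_map_of_injective _ _ (fun a b h => by simpa using h) e

theorem pv_count_qsE (es : List String) (e : String) :
    ((pvQsE es).count e : Int) = pvVal es e := by
  induction es with
  | nil =>
    simp only [pvQsE, List.flatMap_nil, List.count_nil, pvVal, List.length_nil]
    split <;> simp
  | cons x t ih =>
    have hq : pvQsE (x :: t) = x :: "total" :: pvQsE t := rfl
    rw [hq]
    by_cases he : e = "total"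
    · subst he
      unfold pvVal at ih ⊢
      rw [if_pos rfl] at ih ⊢
      rw [List.count_cons, List.count_cons, List.count_cons, List.length_cons]
      by_cases hx : x = "total"
      · subst hx
        simp only [beq_self_eq_true, if_pos]
        push_cast at ih ⊢
        omega
      · have hb : (x == "total") = false := by simpa using hx
        simp only [hb, beq_self_eq_true, Bool.false_eq_true, if_false, if_pos]
        push_cast at ih ⊢
        omega
    · unfold pvVal at ih ⊢
      rw [if_neg he] at ih ⊢
      have hb : (("total" : String) == e) = false := by
        simp only [beq_eq_false_iff_ne, ne_eq]
        exact fun h => he h.symm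
      rw [List.count_cons, List.count_cons, List.count_cons, hb]
      by_cases hx : x = e
      · subst hx
        simp only [beq_self_eq_true, if_pos, Bool.false_eq_true, if_false]
        push_cast at ih ⊢
        omega
      · have hb2 : (x == e) = false := by simpa using hx
        simp only [hb2, Bool.false_eq_true, if_false]
        push_cast at ih ⊢
        omega

-- B's reshape step
def pvStepB (r : PySem.Dict String (PySem.Dict String Int)) (q : (String × String) × Int) :
    PySem.Dict String (PySem.Dict String Int) :=
  r.insert q.1.1 ((r.getD q.1.1 PySem.Dict.empty).insert q.1.2 q.2)

theorem pv_reshape_items (L : List ((String × String) × Int)) (h : (L.map Prod.fst).Nodup) :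
    (L.foldl pvStepB PySem.Dict.empty).items
    = (PySem.List.dedup (L.map (fun q => q.1.1))).map
        (fun m => (m, PySem.Dict.mk ((L.filter (fun q => q.1.1 == m)).map
          (fun q => (q.1.2, q.2))))) := by
  induction L using List.reverseRecOn with
  | nil => rfl
  | append_singleton L q ih =>
    obtain ⟨⟨m, e⟩, n⟩ := q
    have hnd : (L.map Prod.fst).Nodup := by
      rw [List.map_append] at h
      exact (List.nodup_append.1 h).1
    have hkey : ((m, e) : String × String) ∉ L.map Prod.fst := by
      rw [List.map_append] at h
      intro hc
      rcases List.nodup_append.1 h with ⟨_, _, hdisj⟩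
      exact hdisj _ hc _ (List.mem_map_of_mem (List.mem_singleton_self _)) rfl
    have ih' := ih hnd
    have hkeys : (L.foldl pvStepB PySem.Dict.empty).keys =
        PySem.List.dedup (L.map (fun q => q.1.1)) := by
      simp only [PySem.Dict.keys, ih', List.map_map]
      exact List.map_id _
    have hnodupk : (L.foldl pvStepB PySem.Dict.empty).keys.Nodup := by
      rw [hkeys]; exact PySem.List.nodup_dedup _
    rw [List.foldl_append, List.foldl_cons, List.foldl_nil]
    simp only [pvStepB]
    have hmapf : ((L ++ [((m, e), n)]).map (fun q => q.1.1)) = L.map (fun q => q.1.1) ++ [m] := by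
      simp
    have hfilt : ∀ m' : String, (L ++ [((m, e), n)]).filter (fun q => q.1.1 == m') =
        L.filter (fun q => q.1.1 == m') ++ (if m = m' then [((m, e), n)] else []) := by
      intro m'
      by_cases hmm : m = m' <;> simp [List.filter_append, hmm]
    by_cases hm : m ∈ L.map (fun q => q.1.1)
    · have hc : (L.foldl pvStepB PySem.Dict.empty).contains m = true := by
        rw [PySem.Dict.contains_eq_decide_mem_keys, hkeys]
        simp [hm]
      have hgetD : (L.foldl pvStepB PySem.Dict.empty).getD m PySem.Dict.empty =
          PySem.Dict.mk ((L.filter (fun q => q.1.1 == m)).map (fun q => (q.1.2, q.2))) := by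
        refine PySem.Dict.getD_of_mem_items _ ?_ hnodupk _
        rw [ih']
        exact List.mem_map.2 ⟨m, (PySem.List.mem_dedup _ _).2 hm, rfl⟩
      have hce : (PySem.Dict.mk ((L.filter (fun q => q.1.1 == m)).map
          (fun q => (q.1.2, q.2)))).contains e = false := by
        rw [PySem.Dict.contains_eq_decide_mem_keys, PySem.Dict.keys_mk, List.map_map]
        simp only [decide_eq_false_iff_not, List.mem_map, Function.comp]
        rintro ⟨q', hq', he'⟩
        rcases List.mem_filter.1 hq' with ⟨hqL, hqm⟩
        apply hkey
        have : q'.1 = (m, e) := by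
          have h1 : q'.1.1 = m := by simpa using hqm
          have h2 : q'.1.2 = e := he'
          exact Prod.ext h1 h2
        exact this ▸ List.mem_map_of_mem hqL
      rw [hgetD, PySem.Dict.items_insert_of_contains _ _ hc, ih', hmapf,
        pv_dedup_append, if_pos hm, List.map_map]
      apply List.map_congr_left
      intro m' hm'
      simp only [Function.comp]
      by_cases hmm : m' = m
      · subst hmm
        simp only [beq_self_eq_true, if_pos]
        rw [hfilt, if_pos rfl, List.map_append]
        exact congrArg _ (PySem.Dict.ext (by
          rw [PySem.Dict.items_insert_of_not_contains _ _ hce]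
          rfl))
      · have : (m' == m) = false := by simp [hmm]
        simp only [this, Bool.false_eq_true, if_false]
        rw [hfilt, if_neg (fun hx => hmm hx.symm), List.append_nil]
    · have hc : (L.foldl pvStepB PySem.Dict.empty).contains m = false := by
        rw [PySem.Dict.contains_eq_decide_mem_keys, hkeys]
        simp [hm]
      have hgetD : (L.foldl pvStepB PySem.Dict.empty).getD m PySem.Dict.empty =
          PySem.Dict.empty := PySem.Dict.getD_of_not_contains _ _ hc
      have hempty : ((PySem.Dict.empty : PySem.Dict String Int).insert e n) =
          PySem.Dict.mk [(e, n)] := by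
        apply PySem.Dict.ext
        rw [PySem.Dict.items_insert_of_not_contains _ _ (by simp [PySem.Dict.contains_empty])]
        simp [PySem.Dict.empty]
      rw [hgetD, hempty, PySem.Dict.items_insert_of_not_contains _ _ hc, ih', hmapf,
        pv_dedup_append, if_neg hm, List.map_append, List.map_singleton]
      congr 1
      · apply List.map_congr_left
        intro m' hm'
        have hmm : m' ≠ m := by
          intro hx
          exact hm (hx ▸ (PySem.List.mem_dedup _ _).1 hm')
        rw [hfilt, if_neg (fun hx => hmm hx.symm), List.append_nil]
      · rw [hfilt, if_pos rfl]
        have hz : L.filter (fun q => q.1.1 == m) = [] := by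
          rw [List.filter_eq_nil_iff]
          intro q' hq'
          simp only [beq_iff_eq]
          intro hqm
          exact hm (hqm ▸ List.mem_map.2 ⟨q', hq', rfl⟩)
        rw [hz]
        rfl

theorem pv_portB_eq (rows : List (List (String × String))) :
    count_by_media_and_explicitness_py_alt rows =
      (((PySem.Dict.counter (pvQs (rows.map (fun row => (pvMediaOf row, pvExplOf row))))).items.foldl
        pvStepB PySem.Dict.empty).items).map (fun q => (q.1, q.2.items)) := by
  unfold count_by_media_and_explicitness_py_alt
  rw [pv_tally_eq]
  rfl

theorem pv_portB_canonical (rows : List (List (String × String))) :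
    count_by_media_and_explicitness_py_alt rows =
      (PySem.List.dedup ((rows.map (fun row => (pvMediaOf row, pvExplOf row))).map Prod.fst)).map
        (fun m => (m, pvBucket (pvEsOf m (rows.map (fun row => (pvMediaOf row, pvExplOf row)))))) := by
  set ps := rows.map (fun row => (pvMediaOf row, pvExplOf row)) with hps
  rw [pv_portB_eq]
  have hLitems : (PySem.Dict.counter (pvQs ps)).items =
      (PySem.List.dedup (pvQs ps)).map (fun k => (k, ((pvQs ps).count k : Int))) := by
    rw [PySem.Dict.items_counter, ← PySem.List.dedup_eq_ofList]
  have hnd : ((PySem.Dict.counter (pvQs ps)).items.map Prod.fst).Nodup := by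
    rw [hLitems, List.map_map]
    have h0 : List.map (Prod.fst ∘ fun (k : String × String) => (k, ((pvQs ps).count k : Int)))
        (PySem.List.dedup (pvQs ps)) = PySem.List.dedup (pvQs ps) := List.map_id _
    rw [h0]
    exact PySem.List.nodup_dedup _
  rw [pv_reshape_items _ hnd]
  have hmed : PySem.List.dedup ((PySem.Dict.counter (pvQs ps)).items.map (fun q => q.1.1)) =
      PySem.List.dedup (ps.map Prod.fst) := by
    rw [hLitems, List.map_map]
    have h1 : PySem.List.dedup ((PySem.List.dedup (pvQs ps)).map
        ((fun (q : (String × String) × Int) => q.1.1) ∘ (fun k => (k, ((pvQs ps).count k : Int))))) =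
        PySem.List.dedup ((PySem.List.dedup (pvQs ps)).map Prod.fst) := rfl
    rw [h1, pv_dedup_map_dedup, pv_dedup_qs_fst]
  rw [hmed, List.map_map]
  apply List.map_congr_left
  intro m hm
  simp only [Function.comp]
  congr 1
  rw [hLitems, List.filter_map, List.map_map]
  have h2 : ((PySem.List.dedup (pvQs ps)).filter
      ((fun (q : (String × String) × Int) => q.1.1 == m) ∘ (fun k => (k, ((pvQs ps).count k : Int))))) =
      ((PySem.List.dedup (pvQs ps)).filter (fun k => k.1 == m)) := rfl
  rw [h2, pv_dedup_filter, pv_qs_filter,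
    pv_dedup_map_inj (fun e => ((m, e) : String × String)) (fun a b hab => by simpa using hab),
    pv_dedup_qsE, List.map_map]
  unfold pvBucket
  apply List.map_congr_left
  intro e he
  simp only [Function.comp, pv_count_qs, pv_count_qsE]

-- ===== VERDICT (by name: the statement is the Claim_ definition above) =====
theorem count_by_media_and_explicitness_py_spec : Claim_equal_count_by_media_and_explicitness_py := by
  intro rows _
  unfold Spec_count_by_media_and_explicitness_py
  rw [pv_portA_eq, pv_agg_items, List.map_map, pv_portB_canonical]
  apply List.map_congr_left
  intro m hm
  rfl
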